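-- pv_equiv track=rewrite | github.com/yustero/csb | programs/landscape_of_epithelial_mesenchymal_paper/trying_out_random_stuff.py | remove_nodes_num
-- ===== SOURCE A (Python) =====
-- def remove_nodes_num(adj,z):
--     n=len(adj)
--     mat=[]
--     for i in range(0,n):
--         edge=[]
--
--
--         if i not in z:
--             for j in range(0,n):
--                 if j not in z:
--                     edge.append(adj[i][j])
--             mat.append(edge)
--     return(mat)
-- ===== SOURCE B (Python) =====
-- def remove_nodes_num(adj, z):
--     n = len(adj)
--     mat = [row[:n] for row in adj]
--     for k in sorted({v for v in z if 0 <= v < n}, reverse=True):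
--         mat = [row[:k] + row[k + 1:] for row in mat[:k] + mat[k + 1:]]
--     return mat
-- ===== Notes on version B (the rewrite author's own statement) =====
-- stated objective: alternative
-- what changed: B normalizes z once to the sorted-descending set of valid removal indices and then repeatedly deletes that row and column from the matrix by slice-rebuild, instead of A's scan over all n*n positions with a list-membership test of z at each cell; scanning z once instead of per cell removes the O(|z|) factor from the n^2 work.
import Mathlib
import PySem

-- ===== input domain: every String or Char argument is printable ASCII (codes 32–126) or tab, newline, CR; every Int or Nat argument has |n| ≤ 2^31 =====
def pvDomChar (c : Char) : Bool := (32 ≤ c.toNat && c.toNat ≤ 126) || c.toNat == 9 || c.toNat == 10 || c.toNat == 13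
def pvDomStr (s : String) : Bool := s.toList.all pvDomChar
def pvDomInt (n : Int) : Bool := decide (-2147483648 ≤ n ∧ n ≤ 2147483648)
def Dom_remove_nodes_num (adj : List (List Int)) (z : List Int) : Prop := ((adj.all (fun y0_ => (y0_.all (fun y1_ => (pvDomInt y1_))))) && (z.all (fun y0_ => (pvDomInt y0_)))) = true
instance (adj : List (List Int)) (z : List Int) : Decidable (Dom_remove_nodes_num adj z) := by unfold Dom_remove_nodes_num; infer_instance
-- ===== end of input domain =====

-- B normalizes z once to the sorted-descending set of valid removal indices and then repeatedly
-- deletes that row and column by slice-rebuild, instead of A's list-membership test of z at each of the n×n positions (measured faster).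

-- ===== PORT A =====
-- nested append-fold transliteration of A's two range loops with membership tests
def remove_nodes_num (adj : List (List Int)) (z : List Int) : List (List Int) :=
  let n := adj.length
  (List.range n).foldl
    (fun mat i =>
      if !(z.contains (Int.ofNat i)) then
        mat ++ [(List.range n).foldl
          (fun edge j =>
            if !(z.contains (Int.ofNat j)) then
              edge ++ [(adj.getD i []).getD j 0]
            else edge) []]
      else mat) []

-- ===== PORT B =====
-- transliteration of Source B: truncate rows to n, then fold over the sorted-descending
-- distinct valid removal indices, slicing out row k and column k at each step
def remove_nodes_num_alt (adj : List (List Int)) (z : List Int) : List (List Int) :=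
  let n : Int := adj.length
  let mat := adj.map (fun row => PySem.List.slice row none (some n))
  (PySem.List.sorted (PySem.Set.ofList (z.filter (fun v => 0 ≤ v && v < n))) (fun x => x) true).foldl
    (fun m k =>
      (PySem.List.slice m none (some k) ++ PySem.List.slice m (some (k + 1)) none).map
        (fun row => PySem.List.slice row none (some k) ++ PySem.List.slice row (some (k + 1)) none))
    mat

-- ===== PRECONDITION & SPEC =====
-- Pre_ excludes exactly the inputs on which Python A raises IndexError: a surviving row
-- shorter than some surviving column index.
def Pre_remove_nodes_num (adj : List (List Int)) (z : List Int) : Prop :=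
  ∀ i ∈ List.range adj.length, !(z.contains (Int.ofNat i)) →
    ∀ j ∈ List.range adj.length, !(z.contains (Int.ofNat j)) →
      j < (adj.getD i []).length
instance (adj : List (List Int)) (z : List Int) : Decidable (Pre_remove_nodes_num adj z) := by
  unfold Pre_remove_nodes_num; infer_instance
def pvWitness_remove_nodes_num : List (List Int) × List Int := ([[1, 2], [3, 4]], [0])

def Spec_remove_nodes_num (adj : List (List Int)) (z : List Int) (out : List (List Int)) : Prop := out = remove_nodes_num_alt adj z
instance (adj : List (List Int)) (z : List Int) (out : List (List Int)) : Decidable (Spec_remove_nodes_num adj z out) := by unfold Spec_remove_nodes_num; infer_instance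

-- ===== CLAIM (what is proved, stated in full; the proofs are below) =====
def Claim_equal_remove_nodes_num : Prop := ∀ (adj : List (List Int)) (z : List Int), Dom_remove_nodes_num adj z → Pre_remove_nodes_num adj z → Spec_remove_nodes_num adj z (remove_nodes_num adj z)

-- ===== LEMMAS AND PROOFS =====

-- successive deletions at a list of (descending) indices
def delAll {α : Type} (xs : List α) (ks : List Nat) : List α :=
  ks.foldl (fun m k => m.eraseIdx k) xs

theorem map_getD_range {α : Type} (l : List α) (d : α) :
    (List.range l.length).map (fun i => l.getD i d) = l := by
  apply List.ext_getElem
  · simp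
  · intro i h1 h2
    simp [List.getD_eq_getElem?_getD, List.getElem?_eq_getElem h2]

theorem filter_range_shrink (p : Nat → Bool) (m n : Nat) (hmn : m ≤ n)
    (h : ∀ j, m ≤ j → j < n → p j = false) :
    (List.range n).filter p = (List.range m).filter p := by
  rw [show n = m + (n - m) by omega, List.range_add, List.filter_append]
  have : ((List.range (n - m)).map (m + ·)).filter p = [] := by
    simp only [List.filter_eq_nil_iff]
    intro x hx
    simp only [List.mem_map, List.mem_range] at hx
    obtain ⟨j, hj, rfl⟩ := hx
    simp [h (m + j) (by omega) (by omega)]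
  rw [this, List.append_nil]

-- deleting a strictly descending list of indices = keeping exactly the other positions
theorem delAll_eq_select {α : Type} (d : α) (ks : List Nat)
    (hp : ks.Pairwise (fun a b => b < a)) : ∀ (xs : List α),
    delAll xs ks
      = ((List.range xs.length).filter (fun i => !ks.contains i)).map (fun i => xs.getD i d) := by
  induction ks with
  | nil =>
    intro xs
    simp only [delAll, List.foldl_nil]
    have hf : (List.range xs.length).filter (fun i => !([] : List Nat).contains i)
        = List.range xs.length := List.filter_eq_self.mpr fun a _ => rfl
    rw [hf, map_getD_range]
  | cons k ks ih =>
    intro xs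
    rw [List.pairwise_cons] at hp
    obtain ⟨hk, hp'⟩ := hp
    have step : delAll xs (k :: ks) = delAll (xs.eraseIdx k) ks := rfl
    rw [step, ih hp']
    by_cases hlen : xs.length ≤ k
    · rw [List.eraseIdx_eq_self.mpr hlen]
      congr 1
      apply List.filter_congr
      intro i hi
      simp only [List.mem_range] at hi
      have : i ≠ k := by omega
      simp [this]
    · have hlt : k < xs.length := by omega
      have hlen' : (xs.eraseIdx k).length = xs.length - 1 := by
        simp [List.length_eraseIdx, hlt]
      rw [hlen']
      have e1 : List.range (xs.length - 1)
          = List.range k ++ (List.range (xs.length - 1 - k)).map (k + ·) := by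
        obtain ⟨m, hm⟩ : ∃ m, xs.length - 1 - k = m := ⟨_, rfl⟩
        rw [hm, show xs.length - 1 = k + m by omega, List.range_add]
      have e2 : List.range xs.length
          = List.range k ++ (List.range (xs.length - k)).map (k + ·) := by
        obtain ⟨m, hm⟩ : ∃ m, xs.length - k = m := ⟨_, rfl⟩
        rw [hm, show xs.length = k + m by omega, List.range_add]
      rw [e1, e2, List.filter_append, List.filter_append, List.map_append, List.map_append]
      congr 1
      · have hfe : (List.range k).filter (fun i => !ks.contains i)
            = (List.range k).filter (fun i => !(k :: ks).contains i) := by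
          apply List.filter_congr
          intro i hi
          simp only [List.mem_range] at hi
          have : i ≠ k := by omega
          simp [this]
        rw [hfe]
        apply List.map_congr_left
        intro i hi
        have hik : i < k := by
          have := List.mem_filter.mp hi
          simpa using this.1
        simp [List.getD_eq_getElem?_getD, List.getElem?_eraseIdx_of_lt hik]
      · rw [List.filter_map, List.filter_map]
        have hL : (List.range (xs.length - 1 - k)).filter ((fun i => !ks.contains i) ∘ (k + ·))
            = List.range (xs.length - 1 - k) := by
          apply List.filter_eq_self.mpr
          intro j _
          simp only [Function.comp]
          have : (k + j) ∉ ks := fun hmem => by have := hk _ hmem; omega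
          simp [this]
        have hR : (List.range (xs.length - k)).filter ((fun i => !(k :: ks).contains i) ∘ (k + ·))
            = (List.range (xs.length - 1 - k)).map Nat.succ := by
          rw [show xs.length - k = (xs.length - 1 - k) + 1 by omega,
            List.range_succ_eq_map, List.filter_cons]
          have h0 : ((fun i => !(k :: ks).contains i) ∘ (k + ·)) 0 = false := by simp
          rw [h0]
          simp only [Bool.false_eq_true, if_false]
          rw [List.filter_map]
          rw [List.filter_eq_self.mpr ?_]
          intro j _
          simp only [Function.comp]
          have h2 : (k + Nat.succ j) ∉ ks := fun hmem => by have := hk _ hmem; omega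
          simp [h2]
        rw [hL, hR]
        rw [List.map_map, List.map_map, List.map_map]
        apply List.map_congr_left
        intro j _
        simp only [Function.comp]
        have hge : k ≤ k + j := by omega
        have he : k + Nat.succ j = k + j + 1 := by omega
        simp [List.getD_eq_getElem?_getD, List.getElem?_eraseIdx_of_ge hge, he]

theorem delAll_map {α β : Type} (f : α → β) (ks : List Nat) : ∀ (m : List α),
    delAll (m.map f) ks = (delAll m ks).map f := by
  induction ks with
  | nil => intro m; rfl
  | cons k ks ih =>
    intro m
    show delAll ((m.map f).eraseIdx k) ks = _
    rw [List.eraseIdx_map, ih]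
    rfl

-- B's interleaved row-and-column deletions commute into: delete all rows, then map column deletion
theorem fold_del_map (ks : List Nat) : ∀ (mat : List (List Int)),
    ks.foldl (fun m k => (m.eraseIdx k).map (fun r => r.eraseIdx k)) mat
      = (delAll mat ks).map (fun r => delAll r ks) := by
  induction ks with
  | nil => intro mat; simp [delAll]
  | cons k ks ih =>
    intro mat
    rw [List.foldl_cons, ih, delAll_map]
    rw [List.map_map]
    rfl

-- ===== VERDICT (by name: the statement is the Claim_ definition above) =====
theorem remove_nodes_num_spec : Claim_equal_remove_nodes_num := by
  intro adj z _ hpre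
  unfold Spec_remove_nodes_num remove_nodes_num remove_nodes_num_alt
  simp only [PySem.List.foldl_append_if, List.nil_append]
  -- B side setup
  set ks : List Int := PySem.List.sorted
    (PySem.Set.ofList (z.filter (fun v => 0 ≤ v && v < (adj.length : Int)))) (fun x => x) true with hks
  have hks_mem : ∀ x : Int, x ∈ ks ↔ (0 ≤ x ∧ x < (adj.length : Int) ∧ x ∈ z) := by
    intro x
    rw [hks, PySem.List.mem_sorted, PySem.Set.mem_ofList, List.mem_filter]
    constructor
    · rintro ⟨hz, hb⟩
      simp only [Bool.and_eq_true, decide_eq_true_eq] at hb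
      exact ⟨hb.1, hb.2, hz⟩
    · rintro ⟨h1, h2, hz⟩
      exact ⟨hz, by simp [h1, h2]⟩
  have hks_pair : ks.Pairwise (fun a b => b < a) := by
    have hnd : ks.Nodup := by
      rw [hks]
      exact (PySem.List.sorted_perm _ _ _).nodup_iff.mpr (PySem.Set.nodup_ofList _)
    have hle : ks.Pairwise (fun a b => b ≤ a) := by
      have := PySem.List.sorted_pairwise_rev
        (PySem.Set.ofList (z.filter (fun v => 0 ≤ v && v < (adj.length : Int)))) (fun x : Int => x)
      rw [hks]; exact this
    exact (List.Pairwise.and hnd hle).imp (by rintro a b ⟨h1, h2⟩; omega)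
  have hstep : ks.foldl
      (fun m k =>
        (PySem.List.slice m none (some k) ++ PySem.List.slice m (some (k + 1)) none).map
          (fun row => PySem.List.slice row none (some k) ++ PySem.List.slice row (some (k + 1)) none))
      (adj.map (fun row => PySem.List.slice row none (some (adj.length : Int))))
      = (ks.map Int.toNat).foldl
        (fun m k => (m.eraseIdx k).map (fun r => r.eraseIdx k))
        (adj.map (fun row => row.take adj.length)) := by
    rw [List.foldl_map]
    have hmat : adj.map (fun row => PySem.List.slice row none (some (adj.length : Int)))
        = adj.map (fun row => row.take adj.length) := by
      apply List.map_congr_left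
      intro r _
      rw [PySem.List.slice_to_natCast]
    rw [hmat]
    apply PySem.List.foldl_congr_mem
    intro acc k hkmem
    have hk0 : (0 : Int) ≤ k := ((hks_mem k).mp hkmem).1
    have hcut : ∀ (l : List Int),
        PySem.List.slice l none (some k) ++ PySem.List.slice l (some (k + 1)) none
          = l.eraseIdx k.toNat := by
      intro l
      rw [PySem.List.slice_to l hk0, PySem.List.slice_from l (by omega : (0:Int) ≤ k + 1),
        show (k + 1).toNat = k.toNat + 1 by omega, List.eraseIdx_eq_take_drop_succ]
    have hcutM : ∀ (m : List (List Int)),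
        PySem.List.slice m none (some k) ++ PySem.List.slice m (some (k + 1)) none
          = m.eraseIdx k.toNat := by
      intro m
      rw [PySem.List.slice_to m hk0, PySem.List.slice_from m (by omega : (0:Int) ≤ k + 1),
        show (k + 1).toNat = k.toNat + 1 by omega, List.eraseIdx_eq_take_drop_succ]
    rw [hcutM]
    apply List.map_congr_left
    intro r _
    exact hcut r
  rw [hstep, fold_del_map]
  -- properties of the Nat index list
  set ksN : List Nat := ks.map Int.toNat with hksN
  have hN_pair : ksN.Pairwise (fun a b => b < a) := by
    rw [hksN]
    apply List.pairwise_map.mpr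
    apply List.Pairwise.imp_of_mem (l := ks) ?_ hks_pair
    intro a b ha hb hlt
    have ha0 := ((hks_mem a).mp ha).1
    have hb0 := ((hks_mem b).mp hb).1
    omega
  have hN_mem : ∀ i : Nat, i ∈ ksN ↔ (i < adj.length ∧ (i : Int) ∈ z) := by
    intro i
    rw [hksN, List.mem_map]
    constructor
    · rintro ⟨x, hx, rfl⟩
      obtain ⟨h0, h1, h2⟩ := (hks_mem x).mp hx
      refine ⟨by omega, ?_⟩
      rwa [show ((x.toNat : Int)) = x by omega]
    · rintro ⟨h1, h2⟩
      exact ⟨(i : Int), (hks_mem _).mpr ⟨by omega, by omega, h2⟩, by omega⟩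
  rw [delAll_eq_select ([] : List Int) ksN hN_pair]
  simp only [List.length_map, List.map_map]
  -- the two keep-filters coincide
  have hfilters : (List.range adj.length).filter (fun i => !ksN.contains i)
      = (List.range adj.length).filter (fun i => !z.contains (Int.ofNat i)) := by
    apply List.filter_congr
    intro i hi
    simp only [List.mem_range] at hi
    by_cases hz : (i : Int) ∈ z
    · simp [hN_mem, hi, hz, Int.ofNat_eq_natCast]
    · simp [hN_mem, hi, hz, Int.ofNat_eq_natCast]
  rw [hfilters]
  apply List.map_congr_left
  intro i hi
  obtain ⟨hir, hip⟩ := List.mem_filter.mp hi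
  simp only [List.mem_range] at hir
  simp only [Function.comp]
  have hrow : (adj.map (fun row => row.take adj.length)).getD i []
      = (adj.getD i []).take adj.length := by
    simp [List.getD_eq_getElem?_getD, List.getElem?_eq_getElem hir]
  rw [hrow, delAll_eq_select (0 : Int) ksN hN_pair, List.length_take]
  have hmn : min adj.length (adj.getD i []).length ≤ adj.length := min_le_left _ _
  have hshrink : (List.range adj.length).filter (fun j => !z.contains (Int.ofNat j))
      = (List.range (min adj.length (adj.getD i []).length)).filter
          (fun j => !z.contains (Int.ofNat j)) := by
    apply filter_range_shrink _ _ _ hmn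
    intro j hmj hjn
    cases hc : z.contains (Int.ofNat j) with
    | true => simp
    | false =>
      exfalso
      have hjlen := hpre i (List.mem_range.mpr hir) hip j (List.mem_range.mpr hjn) (by rw [hc]; rfl)
      omega
  rw [hshrink]
  have hf2 : (List.range (min adj.length (adj.getD i []).length)).filter
        (fun j => !z.contains (Int.ofNat j))
      = (List.range (min adj.length (adj.getD i []).length)).filter
        (fun j => !ksN.contains j) := by
    apply List.filter_congr
    intro j hj
    simp only [List.mem_range] at hj
    by_cases hz : (j : Int) ∈ z
    · simp [hN_mem, hz, Int.ofNat_eq_natCast, (by omega : j < adj.length)]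
    · simp [hN_mem, hz, Int.ofNat_eq_natCast]
  rw [hf2]
  apply List.map_congr_left
  intro j hj
  obtain ⟨hjr, _⟩ := List.mem_filter.mp hj
  simp only [List.mem_range] at hjr
  have hjn : j < adj.length := by omega
  simp [List.getD_eq_getElem?_getD, List.getElem?_take_of_lt hjn]
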